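-- pv_equiv track=rewrite | github.com/lalit527/DS | Sequence4/Advance-Algorithm/Week4/submission/1circuit_design.py | build_implication_graph
-- ===== SOURCE A (Python) =====
-- def build_implication_graph(n, clauses):
--   edges = []
--   var_dict = {}
--   node_dict = {}
--   node_num = 0
--   adjacents = [[] for _ in range(2*n)]
--   rev_adjacents = [[] for _ in range(2*n)]
--
--   for clause in clauses:
--     left = clause[0]
--     right = clause[1]
--     for term in [left, right]:
--       if not term in node_dict:
--         var_dict[node_num] = term
--         node_dict[term] = node_num
--         node_num += 1
--       if not -term in node_dict:
--         var_dict[node_num] = -term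
--         node_dict[-term] = node_num
--         node_num += 1
--
--     adjacents[node_dict[-left]].append(node_dict[right])
--     rev_adjacents[node_dict[right]].append(node_dict[-left])
--
--     adjacents[node_dict[-right]].append(node_dict[left])
--     rev_adjacents[node_dict[left]].append(node_dict[-right])
--
--   return edges, adjacents[:node_num], rev_adjacents[:node_num], node_dict, var_dict
-- ===== SOURCE B (Python) =====
-- def build_implication_graph(n, clauses):
--   seq = [t for c in clauses for t in (c[0], -c[0], c[1], -c[1])]
--   order = list(dict.fromkeys(seq))
--   node_dict = {t: i for i, t in enumerate(order)}
--   var_dict = {i: t for i, t in enumerate(order)}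
--   pairs = [e for c in clauses
--              for e in ((node_dict[-c[0]], node_dict[c[1]]),
--                        (node_dict[-c[1]], node_dict[c[0]]))]
--   k = len(order)
--   adjacents = [[d for s, d in pairs if s == i] for i in range(k)]
--   rev_adjacents = [[s for s, d in pairs if d == i] for i in range(k)]
--   return [], adjacents, rev_adjacents, node_dict, var_dict
-- ===== Notes on version B (the rewrite author's own statement) =====
-- stated objective: alternative
-- what changed: A mutates preallocated 2n adjacency lists, appending edges clause by clause while growing the node maps inline, then slices; B never mutates or preallocates: it numbers literals by deduplicating the literal sequence, materialises the edge-pair list once, and builds each adjacency row by grouping (a per-node comprehension over the pairs), so adjacency rows are computed, not accumulated.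
import Mathlib
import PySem

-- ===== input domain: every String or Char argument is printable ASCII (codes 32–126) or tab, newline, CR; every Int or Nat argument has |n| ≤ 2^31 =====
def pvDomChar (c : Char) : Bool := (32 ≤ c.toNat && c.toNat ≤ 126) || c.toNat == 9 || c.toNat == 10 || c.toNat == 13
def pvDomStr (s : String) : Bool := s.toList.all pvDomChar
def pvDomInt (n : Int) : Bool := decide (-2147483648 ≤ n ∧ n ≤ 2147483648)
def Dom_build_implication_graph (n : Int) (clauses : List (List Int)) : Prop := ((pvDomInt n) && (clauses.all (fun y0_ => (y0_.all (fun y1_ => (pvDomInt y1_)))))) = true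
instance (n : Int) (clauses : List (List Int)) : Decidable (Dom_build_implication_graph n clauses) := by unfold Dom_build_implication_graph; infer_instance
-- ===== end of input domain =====

-- B replaces A's mutate-preallocated-lists-and-slice scheme: it numbers literals by deduplicating
-- the literal sequence, materialises the edge-pair list once, and computes each adjacency row by
-- grouping (a per-node comprehension over the pairs); no preallocation, mutation or slicing (objective: alternative).

-- ===== PORT A =====
-- adjacents[i].append(x); exact for 0 ≤ i < len(adjacents) (Python raises IndexError otherwise; Pre_ excludes that)
def pvAppendAt (xss : List (List Int)) (i : Int) (x : Int) : List (List Int) :=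
  xss.modify i.toNat (· ++ [x])

-- one iteration of A's inner 'for term in [left, right]' loop
def pvAddTerm (s : PySem.Dict Int Int × PySem.Dict Int Int × Int) (term : Int) :
    PySem.Dict Int Int × PySem.Dict Int Int × Int :=
  let s1 := if !(s.2.1.contains term)
            then (s.1.insert s.2.2 term, s.2.1.insert term s.2.2, s.2.2 + 1) else s
  if !(s1.2.1.contains (-term))
  then (s1.1.insert s1.2.2 (-term), s1.2.1.insert (-term) s1.2.2, s1.2.2 + 1) else s1

-- the body of A's 'for clause in clauses' loop; state = (var_dict, node_dict, node_num, adjacents, rev_adjacents)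
def pvStepA (st : PySem.Dict Int Int × PySem.Dict Int Int × Int × List (List Int) × List (List Int))
    (clause : List Int) :
    PySem.Dict Int Int × PySem.Dict Int Int × Int × List (List Int) × List (List Int) :=
  let left := PySem.List.pyGetD clause 0 0
  let right := PySem.List.pyGetD clause 1 0
  let t := [left, right].foldl pvAddTerm (st.1, st.2.1, st.2.2.1)
  let node_dict := t.2.1
  let adjacents := pvAppendAt st.2.2.2.1 (node_dict.getD (-left) 0) (node_dict.getD right 0)
  let rev_adjacents := pvAppendAt st.2.2.2.2 (node_dict.getD right 0) (node_dict.getD (-left) 0)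
  let adjacents := pvAppendAt adjacents (node_dict.getD (-right) 0) (node_dict.getD left 0)
  let rev_adjacents := pvAppendAt rev_adjacents (node_dict.getD left 0) (node_dict.getD (-right) 0)
  (t.1, t.2.1, t.2.2, adjacents, rev_adjacents)

def build_implication_graph (n : Int) (clauses : List (List Int)) :
    List Int × List (List Int) × List (List Int) × (List (Int × Int)) × (List (Int × Int)) :=
  let init := (PySem.List.pyRange 0 (2*n) 1).map (fun _ => ([] : List Int))
  let st := clauses.foldl pvStepA (PySem.Dict.empty, PySem.Dict.empty, 0, init, init)
  ([], PySem.List.slice st.2.2.2.1 none (some st.2.2.1),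
       PySem.List.slice st.2.2.2.2 none (some st.2.2.1),
       st.2.1.items, st.1.items)

-- ===== PORT B =====
-- node_dict = {t: i for i, t in enumerate(order)}
def pvNodeDict (order : List Int) : PySem.Dict Int Int :=
  (PySem.List.enumerate order).foldl (fun d p => d.insert p.2 p.1) PySem.Dict.empty

-- var_dict = {i: t for i, t in enumerate(order)}
def pvVarDict (order : List Int) : PySem.Dict Int Int :=
  (PySem.List.enumerate order).foldl (fun d p => d.insert p.1 p.2) PySem.Dict.empty

def build_implication_graph_alt (n : Int) (clauses : List (List Int)) :
    List Int × List (List Int) × List (List Int) × (List (Int × Int)) × (List (Int × Int)) :=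
  let seq := clauses.flatMap (fun c =>
      [PySem.List.pyGetD c 0 0, -(PySem.List.pyGetD c 0 0),
       PySem.List.pyGetD c 1 0, -(PySem.List.pyGetD c 1 0)])
  let order := PySem.List.dedup seq
  let node_dict := pvNodeDict order
  let var_dict := pvVarDict order
  let pairs := clauses.flatMap (fun c =>
      [(node_dict.getD (-(PySem.List.pyGetD c 0 0)) 0, node_dict.getD (PySem.List.pyGetD c 1 0) 0),
       (node_dict.getD (-(PySem.List.pyGetD c 1 0)) 0, node_dict.getD (PySem.List.pyGetD c 0 0) 0)])
  let k : Int := order.length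
  let adjacents := (PySem.List.pyRange 0 k 1).map
      (fun i => (pairs.filter (fun p => p.1 == i)).map (·.2))
  let rev_adjacents := (PySem.List.pyRange 0 k 1).map
      (fun i => (pairs.filter (fun p => p.2 == i)).map (·.1))
  ([], adjacents, rev_adjacents, node_dict.items, var_dict.items)

-- ===== PRECONDITION & SPEC =====
-- Pre_ is exactly where the Python A returns: every clause needs clause[0] and clause[1]
-- (IndexError otherwise), and every assigned node number must be an in-range index of the
-- 2n-slot adjacency lists, i.e. the number of distinct literals ±clause[i] is at most 2n
-- (IndexError on the first append at an index ≥ 2n otherwise).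
def Pre_build_implication_graph (n : Int) (clauses : List (List Int)) : Prop :=
  (∀ c ∈ clauses, 2 ≤ c.length) ∧
  (clauses = [] ∨
    (((PySem.Set.ofList (clauses.flatMap fun c =>
        [c.getD 0 0, -(c.getD 0 0), c.getD 1 0, -(c.getD 1 0)])).length : Int) ≤ 2 * n))
instance (n : Int) (clauses : List (List Int)) : Decidable (Pre_build_implication_graph n clauses) := by
  unfold Pre_build_implication_graph; infer_instance

def pvWitness_build_implication_graph : Int × List (List Int) := (1, [[1, -1]])

def Spec_build_implication_graph (n : Int) (clauses : List (List Int)) (out : List Int × List (List Int) × List (List Int) × (List (Int × Int)) × (List (Int × Int))) : Prop := out = build_implication_graph_alt n clauses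
instance (n : Int) (clauses : List (List Int)) (out : List Int × List (List Int) × List (List Int) × (List (Int × Int)) × (List (Int × Int))) : Decidable (Spec_build_implication_graph n clauses out) := by unfold Spec_build_implication_graph; infer_instance

-- ===== CLAIM (what is proved, stated in full; the proofs are below) =====
def Claim_equal_build_implication_graph : Prop := ∀ (n : Int) (clauses : List (List Int)), Dom_build_implication_graph n clauses → Pre_build_implication_graph n clauses → Spec_build_implication_graph n clauses (build_implication_graph n clauses)

-- ===== LEMMAS AND PROOFS =====

-- the literal sequence A attempts to insert, clause by clause
def pvLitsC (clause : List Int) : List Int :=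
  [PySem.List.pyGetD clause 0 0, -(PySem.List.pyGetD clause 0 0),
   PySem.List.pyGetD clause 1 0, -(PySem.List.pyGetD clause 1 0)]

def pvLits (clauses : List (List Int)) : List Int := clauses.flatMap pvLitsC

-- the directed edge pairs A appends, in order, given a node map
def pvPairsC (nd : PySem.Dict Int Int) (c : List Int) : List (Int × Int) :=
  [(nd.getD (-(PySem.List.pyGetD c 0 0)) 0, nd.getD (PySem.List.pyGetD c 1 0) 0),
   (nd.getD (-(PySem.List.pyGetD c 1 0)) 0, nd.getD (PySem.List.pyGetD c 0 0) 0)]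

def pvPairs (nd : PySem.Dict Int Int) (clauses : List (List Int)) : List (Int × Int) :=
  clauses.flatMap (pvPairsC nd)

-- A's edge work per clause, with the node map held fixed; state = (adjacents, rev_adjacents)
def pvStepE (nd : PySem.Dict Int Int) (pr : List (List Int) × List (List Int))
    (clause : List Int) : List (List Int) × List (List Int) :=
  let left := PySem.List.pyGetD clause 0 0
  let right := PySem.List.pyGetD clause 1 0
  let adjacents := pvAppendAt pr.1 (nd.getD (-left) 0) (nd.getD right 0)
  let rev_adjacents := pvAppendAt pr.2 (nd.getD right 0) (nd.getD (-left) 0)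
  let adjacents := pvAppendAt adjacents (nd.getD (-right) 0) (nd.getD left 0)
  let rev_adjacents := pvAppendAt rev_adjacents (nd.getD left 0) (nd.getD (-right) 0)
  (adjacents, rev_adjacents)

-- insert-if-absent of a single literal (half of pvAddTerm)
def pvIns (s : PySem.Dict Int Int × PySem.Dict Int Int × Int) (t : Int) :
    PySem.Dict Int Int × PySem.Dict Int Int × Int :=
  if !(s.2.1.contains t) then (s.1.insert s.2.2 t, s.2.1.insert t s.2.2, s.2.2 + 1) else s

lemma pvAddTerm_eq (s : PySem.Dict Int Int × PySem.Dict Int Int × Int) (t : Int) :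
    pvAddTerm s t = pvIns (pvIns s t) (-t) := rfl

lemma pvEnumerate_append {α : Type} (xs : List α) (x : α) (s : Int) :
    PySem.List.enumerate (xs ++ [x]) s = PySem.List.enumerate xs s ++ [(s + xs.length, x)] := by
  induction xs generalizing s with
  | nil => simp [PySem.List.enumerate_nil, PySem.List.enumerate_cons]
  | cons y ys ih => simp [PySem.List.enumerate_cons, ih]; ring

lemma pvNodeDict_append (S : List Int) (x : Int) :
    pvNodeDict (S ++ [x]) = (pvNodeDict S).insert x (S.length : Int) := by
  simp [pvNodeDict, pvEnumerate_append, List.foldl_append]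

lemma pvVarDict_append (S : List Int) (x : Int) :
    pvVarDict (S ++ [x]) = (pvVarDict S).insert (S.length : Int) x := by
  simp [pvVarDict, pvEnumerate_append, List.foldl_append]

lemma contains_pvNodeDict (S : List Int) (t : Int) :
    (pvNodeDict S).contains t = decide (t ∈ S) := by
  rw [PySem.Dict.contains_eq_decide_mem_keys]
  have h : (pvNodeDict S).keys
      = PySem.Set.update PySem.Dict.empty.keys ((PySem.List.enumerate S).map (·.2)) :=
    PySem.Dict.keys_foldl_insert_key _ _ _ _
  rw [h, PySem.List.map_snd_enumerate]
  simp [PySem.Dict.keys_empty]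

lemma pvIns_set (S : List Int) (t : Int) :
    pvIns (pvVarDict S, pvNodeDict S, (S.length : Int)) t
      = (pvVarDict (PySem.Set.add S t), pvNodeDict (PySem.Set.add S t),
         ((PySem.Set.add S t).length : Int)) := by
  by_cases h : t ∈ S
  · simp [pvIns, contains_pvNodeDict, h]
  · simp [pvIns, contains_pvNodeDict, h, pvNodeDict_append, pvVarDict_append]

lemma foldl_pvIns (ts : List Int) : ∀ (seen : List Int),
    ts.foldl pvIns (pvVarDict (PySem.Set.ofList seen), pvNodeDict (PySem.Set.ofList seen),
        ((PySem.Set.ofList seen).length : Int))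
      = (pvVarDict (PySem.Set.ofList (seen ++ ts)), pvNodeDict (PySem.Set.ofList (seen ++ ts)),
         ((PySem.Set.ofList (seen ++ ts)).length : Int)) := by
  induction ts with
  | nil => intro seen; simp
  | cons t ts ih =>
    intro seen
    have hadd : PySem.Set.add (PySem.Set.ofList seen) t = PySem.Set.ofList (seen ++ [t]) := by
      simp [PySem.Set.ofList_eq_foldl, List.foldl_append]
    rw [List.foldl_cons, pvIns_set, hadd, ih (seen ++ [t])]
    simp

lemma getD_pvNodeDict_append_of_mem (T : List Int) : ∀ (S : List Int), (S ++ T).Nodup →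
    ∀ k ∈ S, (pvNodeDict (S ++ T)).getD k 0 = (pvNodeDict S).getD k 0 := by
  induction T with
  | nil => intro S _ k _; simp
  | cons x T ih =>
    intro S hnd k hk
    have hx : x ∉ S := fun hxS =>
      (List.disjoint_of_nodup_append hnd) hxS (by simp)
    have h1 : S ++ x :: T = (S ++ [x]) ++ T := by simp
    rw [h1, ih (S ++ [x]) (by rw [← h1]; exact hnd) k (by simp [hk]),
        pvNodeDict_append, PySem.Dict.getD_insert_of_ne _ _ _ (by rintro rfl; exact hx hk)]

lemma foldl_add_decomp (ys : List Int) : ∀ s : List Int, ∃ t, ys.foldl PySem.Set.add s = s ++ t := by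
  induction ys with
  | nil => intro s; exact ⟨[], by simp⟩
  | cons y ys ih =>
    intro s
    rw [List.foldl_cons, PySem.Set.add_eq_ite]
    split_ifs with h
    · exact ih s
    · obtain ⟨t, ht⟩ := ih (s ++ [y])
      exact ⟨[y] ++ t, by simp [ht]⟩

lemma getD_stable (xs ys : List Int) (k : Int) (hk : k ∈ xs) :
    (pvNodeDict (PySem.Set.ofList (xs ++ ys))).getD k 0
      = (pvNodeDict (PySem.Set.ofList xs)).getD k 0 := by
  have h1 : PySem.Set.ofList (xs ++ ys) = ys.foldl PySem.Set.add (PySem.Set.ofList xs) := by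
    simp [PySem.Set.ofList_eq_foldl, List.foldl_append]
  obtain ⟨t, ht⟩ := foldl_add_decomp ys (PySem.Set.ofList xs)
  rw [h1, ht]
  exact getD_pvNodeDict_append_of_mem t (PySem.Set.ofList xs)
    (by rw [← ht, ← h1]; exact PySem.Set.nodup_ofList _) k (by simp [PySem.Set.mem_ofList, hk])

-- A's interleaved loop = build the full maps, then run the pure edge pass with the final map
lemma pvMain (cs : List (List Int)) : ∀ (seen : List Int) (adj radj : List (List Int)),
    cs.foldl pvStepA (pvVarDict (PySem.Set.ofList seen), pvNodeDict (PySem.Set.ofList seen),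
        ((PySem.Set.ofList seen).length : Int), adj, radj)
      = (pvVarDict (PySem.Set.ofList (seen ++ pvLits cs)),
         pvNodeDict (PySem.Set.ofList (seen ++ pvLits cs)),
         ((PySem.Set.ofList (seen ++ pvLits cs)).length : Int),
         cs.foldl (pvStepE (pvNodeDict (PySem.Set.ofList (seen ++ pvLits cs)))) (adj, radj)) := by
  induction cs with
  | nil => intro seen adj radj; simp [pvLits]
  | cons c cs ih =>
    intro seen adj radj
    have hassoc : seen ++ pvLits (c :: cs) = (seen ++ pvLitsC c) ++ pvLits cs := by
      simp [pvLits]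
    have hnum : [PySem.List.pyGetD c 0 0, PySem.List.pyGetD c 1 0].foldl pvAddTerm
          (pvVarDict (PySem.Set.ofList seen), pvNodeDict (PySem.Set.ofList seen),
           ((PySem.Set.ofList seen).length : Int))
        = (pvVarDict (PySem.Set.ofList (seen ++ pvLitsC c)),
           pvNodeDict (PySem.Set.ofList (seen ++ pvLitsC c)),
           ((PySem.Set.ofList (seen ++ pvLitsC c)).length : Int)) := by
      have h4 : [PySem.List.pyGetD c 0 0, PySem.List.pyGetD c 1 0].foldl pvAddTerm
            (pvVarDict (PySem.Set.ofList seen), pvNodeDict (PySem.Set.ofList seen),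
             ((PySem.Set.ofList seen).length : Int))
          = (pvLitsC c).foldl pvIns
            (pvVarDict (PySem.Set.ofList seen), pvNodeDict (PySem.Set.ofList seen),
             ((PySem.Set.ofList seen).length : Int)) := by
        simp [List.foldl_cons, pvAddTerm_eq, pvLitsC]
      rw [h4, foldl_pvIns]
    have hget : ∀ k ∈ pvLitsC c,
        (pvNodeDict (PySem.Set.ofList (seen ++ pvLitsC c))).getD k 0
          = (pvNodeDict (PySem.Set.ofList (seen ++ pvLits (c :: cs)))).getD k 0 := by
      intro k hkm
      rw [hassoc, getD_stable (seen ++ pvLitsC c) (pvLits cs) k (by simp [hkm])]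
    have hstep : pvStepA (pvVarDict (PySem.Set.ofList seen), pvNodeDict (PySem.Set.ofList seen),
          ((PySem.Set.ofList seen).length : Int), adj, radj) c
        = (pvVarDict (PySem.Set.ofList (seen ++ pvLitsC c)),
           pvNodeDict (PySem.Set.ofList (seen ++ pvLitsC c)),
           ((PySem.Set.ofList (seen ++ pvLitsC c)).length : Int),
           pvStepE (pvNodeDict (PySem.Set.ofList (seen ++ pvLits (c :: cs)))) (adj, radj) c) := by
      simp only [pvStepA, hnum, pvStepE]
      rw [hget (PySem.List.pyGetD c 0 0) (by simp [pvLitsC]),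
          hget (-(PySem.List.pyGetD c 0 0)) (by simp [pvLitsC]),
          hget (PySem.List.pyGetD c 1 0) (by simp [pvLitsC]),
          hget (-(PySem.List.pyGetD c 1 0)) (by simp [pvLitsC])]
    rw [List.foldl_cons, hstep, List.foldl_cons]
    have := ih (seen ++ pvLitsC c)
      (pvStepE (pvNodeDict (PySem.Set.ofList (seen ++ pvLits (c :: cs)))) (adj, radj) c).1
      (pvStepE (pvNodeDict (PySem.Set.ofList (seen ++ pvLits (c :: cs)))) (adj, radj) c).2
    rw [hassoc]
    simpa using this

-- the edge pass over clauses = two folds of single appends over the flat pair list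
lemma foldl_pvStepE (nd : PySem.Dict Int Int) (cs : List (List Int)) :
    ∀ (a r : List (List Int)),
    cs.foldl (pvStepE nd) (a, r)
      = ((pvPairs nd cs).foldl (fun xs p => pvAppendAt xs p.1 p.2) a,
         (pvPairs nd cs).foldl (fun xs p => pvAppendAt xs p.2 p.1) r) := by
  induction cs with
  | nil => intro a r; simp [pvPairs]
  | cons c cs ih =>
    intro a r
    rw [List.foldl_cons]
    have h : pvPairs nd (c :: cs) = pvPairsC nd c ++ pvPairs nd cs := by simp [pvPairs]
    rw [h, List.foldl_append, List.foldl_append]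
    rw [ih]
    rfl

-- grouping: the i-th row after all appends is the filter of the pair list at source i
lemma getElem?_foldl_appendAt (σ δ : Int × Int → Int) (E : List (Int × Int)) :
    ∀ (xs : List (List Int)) (i : Nat), (∀ p ∈ E, 0 ≤ σ p) → i < xs.length →
    (E.foldl (fun a p => pvAppendAt a (σ p) (δ p)) xs)[i]?
      = some (xs[i]! ++ (E.filter (fun p => σ p == (i : Int))).map δ) := by
  induction E with
  | nil =>
    intro xs i _ hi
    simp [List.getElem!_eq_getElem?_getD, List.getElem?_eq_getElem hi]
  | cons p E ih =>
    intro xs i hE hi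
    rw [List.foldl_cons]
    have hlen : i < (pvAppendAt xs (σ p) (δ p)).length := by
      simpa [pvAppendAt] using hi
    rw [ih (pvAppendAt xs (σ p) (δ p)) i (fun q hq => hE q (by simp [hq])) hlen]
    have hσ : 0 ≤ σ p := hE p (by simp)
    have hget : (pvAppendAt xs (σ p) (δ p))[i]!
        = if σ p == (i : Int) then xs[i]! ++ [δ p] else xs[i]! := by
      have h1 : (pvAppendAt xs (σ p) (δ p))[i] = if (σ p).toNat = i then xs[i] ++ [δ p] else xs[i] := by
        simp [pvAppendAt, List.getElem_modify]
      rw [List.getElem!_eq_getElem?_getD, List.getElem?_eq_getElem hlen,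
          List.getElem!_eq_getElem?_getD, List.getElem?_eq_getElem hi, h1]
      by_cases h : σ p = (i : Int)
      · have ht : (σ p).toNat = i := by omega
        simp [ht, h]
      · have ht : (σ p).toNat ≠ i := by omega
        simp [ht, h]
    rw [hget, List.filter_cons]
    by_cases hc : σ p == (i : Int)
    · simp [hc]
    · simp [hc]

-- node numbers handed out by pvNodeDict are never negative (the default is 0)
lemma getD_pvNodeDict_nonneg (S : List Int) (k : Int) : 0 ≤ (pvNodeDict S).getD k 0 := by
  induction S using List.reverseRecOn with
  | nil => simp [pvNodeDict, PySem.List.enumerate_nil, PySem.Dict.getD_empty]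
  | append_singleton S x ih =>
    rw [pvNodeDict_append]
    by_cases h : k = x
    · subst h; rw [PySem.Dict.getD_insert_self]; positivity
    · rw [PySem.Dict.getD_insert_of_ne _ _ _ h]; exact ih

lemma pairs_src_nonneg (L : List Int) (cs : List (List Int)) :
    ∀ p ∈ pvPairs (pvNodeDict L) cs, 0 ≤ p.1 ∧ 0 ≤ p.2 := by
  intro p hp
  simp only [pvPairs, List.mem_flatMap, pvPairsC, List.mem_cons] at hp
  obtain ⟨c, _, hc⟩ := hp
  rcases hc with h | h | h
  · subst h; exact ⟨getD_pvNodeDict_nonneg _ _, getD_pvNodeDict_nonneg _ _⟩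
  · subst h; exact ⟨getD_pvNodeDict_nonneg _ _, getD_pvNodeDict_nonneg _ _⟩
  · cases h

-- range(q) for a nonnegative int bound q, as a mapped List.range
lemma pvRange_nonneg (t : Int) (h : 0 ≤ t) :
    PySem.List.pyRange 0 t 1 = (List.range t.toNat).map (fun (k : Nat) => (k : Int)) := by
  conv_lhs => rw [← Int.toNat_of_nonneg h]
  exact PySem.List.pyRange_zero_natCast _

-- take k of the appended rows = B's grouped rows, when the rows start empty and k fits
lemma take_foldl_appendAt (σ δ : Int × Int → Int) (E : List (Int × Int)) (m k : Nat)
    (hk : k ≤ m) (hE : ∀ p ∈ E, 0 ≤ σ p) :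
    (E.foldl (fun a p => pvAppendAt a (σ p) (δ p))
        ((List.range m).map (fun _ => ([] : List Int)))).take k
      = (List.range k).map (fun (i : Nat) => (E.filter (fun p => σ p == (i : Int))).map δ) := by
  apply List.ext_getElem?
  intro i
  by_cases hi : i < k
  · have him : i < m := lt_of_lt_of_le hi hk
    have hlen : i < ((List.range m).map (fun _ => ([] : List Int))).length := by simpa using him
    rw [List.getElem?_take, if_pos hi,
        getElem?_foldl_appendAt σ δ E _ i hE hlen]
    have hempty : ((List.range m).map (fun _ => ([] : List Int)))[i]! = ([] : List Int) := by
      rw [List.getElem!_eq_getElem?_getD, List.getElem?_eq_getElem hlen]; simp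
    rw [hempty, List.nil_append]
    have hr : ((List.range k).map (fun (j : Nat) => (E.filter (fun p => σ p == (j : Int))).map δ))[i]?
        = some ((E.filter (fun p => σ p == (i : Int))).map δ) := by
      rw [List.getElem?_map, List.getElem?_range hi]
      rfl
    rw [hr]
  · have h1 : (List.take k (E.foldl (fun a p => pvAppendAt a (σ p) (δ p))
        ((List.range m).map (fun _ => ([] : List Int)))))[i]? = none := by
      rw [List.getElem?_take, if_neg hi]
    have h2 : ((List.range k).map (fun (j : Nat) => (E.filter (fun p => σ p == (j : Int))).map δ))[i]? = none := by
      rw [List.getElem?_eq_none]; simpa using Nat.le_of_not_lt hi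
    rw [h1, h2]

-- ===== VERDICT (by name: the statement is the Claim_ definition above) =====
theorem build_implication_graph_spec : Claim_equal_build_implication_graph := by
  intro n clauses _ hpre
  unfold Spec_build_implication_graph build_implication_graph build_implication_graph_alt
  simp only [PySem.List.dedup_eq_ofList]
  have hseq : clauses.flatMap (fun c =>
      [PySem.List.pyGetD c 0 0, -(PySem.List.pyGetD c 0 0),
       PySem.List.pyGetD c 1 0, -(PySem.List.pyGetD c 1 0)]) = pvLits clauses := rfl
  rw [hseq]
  set L := PySem.Set.ofList (pvLits clauses) with hL
  set init := (PySem.List.pyRange 0 (2*n) 1).map (fun _ => ([] : List Int)) with hinitdef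
  have hA : clauses.foldl pvStepA (PySem.Dict.empty, PySem.Dict.empty, 0, init, init)
      = (pvVarDict L, pvNodeDict L, ((L.length : Int)),
         clauses.foldl (pvStepE (pvNodeDict L)) (init, init)) := by
    have := pvMain clauses [] init init
    simpa [hL] using this
  rw [hA]
  have hpairs : pvPairs (pvNodeDict L) clauses
      = clauses.flatMap (fun c =>
          [((pvNodeDict L).getD (-(PySem.List.pyGetD c 0 0)) 0, (pvNodeDict L).getD (PySem.List.pyGetD c 1 0) 0),
           ((pvNodeDict L).getD (-(PySem.List.pyGetD c 1 0)) 0, (pvNodeDict L).getD (PySem.List.pyGetD c 0 0) 0)]) := rfl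
  rw [foldl_pvStepE]
  -- the slices
  have hknat : ∃ m : Nat, PySem.List.pyRange 0 (2*n) 1 = (List.range m).map (fun (k : Nat) => (k : Int)) ∧
      L.length ≤ m := by
    rcases hpre.2 with hnil | hle
    · subst hnil
      refine ⟨(2*n).toNat, ?_, ?_⟩
      · by_cases h : 2*n ≤ 0
        · rw [PySem.List.pyRange_one_eq_nil (by omega)]
          simp [Int.toNat_of_nonpos h]
        · exact pvRange_nonneg _ (by omega)
      · simp [hL, pvLits]
    · have hcl : ((PySem.Set.ofList (clauses.flatMap fun c =>
          [c.getD 0 0, -(c.getD 0 0), c.getD 1 0, -(c.getD 1 0)])).length : Int) ≤ 2 * n := hle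
      have hsame : (clauses.flatMap fun c =>
          [c.getD 0 0, -(c.getD 0 0), c.getD 1 0, -(c.getD 1 0)]) = pvLits clauses := by
        apply List.flatMap_congr
        intro c hc
        have h2 : 2 ≤ c.length := hpre.1 c hc
        have h0 : c.getD 0 0 = PySem.List.pyGetD c 0 0 := by
          rw [PySem.List.pyGetD_eq_getElem c (0:Int) (by omega) (by omega)]
          exact List.getD_eq_getElem c 0 (by omega)
        have h1 : c.getD 1 0 = PySem.List.pyGetD c 1 0 := by
          rw [PySem.List.pyGetD_eq_getElem c (0:Int) (i := 1) (by omega) (by omega)]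
          exact List.getD_eq_getElem c 0 (by omega)
        simp only [pvLitsC, h0, h1]
      rw [hsame, ← hL] at hcl
      refine ⟨(2*n).toNat, ?_, by omega⟩
      exact pvRange_nonneg _ (by omega)
  obtain ⟨m, hrange, hle⟩ := hknat
  have hinit : init = (List.range m).map (fun (_ : Nat) => ([] : List Int)) := by
    rw [hinitdef, hrange, List.map_map]; rfl
  have hnn := pairs_src_nonneg L clauses
  have hfst := take_foldl_appendAt Prod.fst Prod.snd (pvPairs (pvNodeDict L) clauses)
      m L.length hle (fun p hp => (hnn p hp).1)
  have hsnd := take_foldl_appendAt Prod.snd Prod.fst (pvPairs (pvNodeDict L) clauses)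
      m L.length hle (fun p hp => (hnn p hp).2)
  have hsl1 : PySem.List.slice
      ((pvPairs (pvNodeDict L) clauses).foldl (fun xs p => pvAppendAt xs p.1 p.2) init)
      none (some ((L.length : Int)))
      = (List.range L.length).map
          (fun (i : Nat) => ((pvPairs (pvNodeDict L) clauses).filter (fun p => p.1 == (i : Int))).map (·.2)) := by
    rw [PySem.List.slice_to_natCast, hinit]
    exact hfst
  have hsl2 : PySem.List.slice
      ((pvPairs (pvNodeDict L) clauses).foldl (fun xs p => pvAppendAt xs p.2 p.1) init)
      none (some ((L.length : Int)))
      = (List.range L.length).map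
          (fun (i : Nat) => ((pvPairs (pvNodeDict L) clauses).filter (fun p => p.2 == (i : Int))).map (·.1)) := by
    rw [PySem.List.slice_to_natCast, hinit]
    exact hsnd
  have hrangeL : PySem.List.pyRange 0 ((L.length : Int)) 1
      = (List.range L.length).map (fun (k : Nat) => (k : Int)) := PySem.List.pyRange_zero_natCast _
  simp only [hsl1, hsl2]
  rw [hrangeL]
  simp only [List.map_map]
  rfl
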